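-- pv_equiv track=rewrite | github.com/Jamesprocode/FullPageJazzOMR | baseline/inference.py | extract_spines
-- ===== SOURCE A (Python) =====
-- def extract_spines(kern_text):
--     """
--     Extract individual spines from **kern format.
--
--     Handles both raw and processed (tokenized/untokenized) kern text:
--     - Skips special tokens like <bos>, <eos>
--     - Finds spine headers (lines starting with **)
--     - Extracts content for each spine
--
--     Returns dict with spine name -> content mapping.
--     E.g., {'**kern': '...melody...', '**mxhm': '...chords...'}
--     """
--     lines = kern_text.strip().split('\n')
--     spines = {}
--     spine_indices = {}
--
--     # Find spine headers (lines starting with **)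
--     for i, line in enumerate(lines):
--         # Remove special tokens from line start if present
--         clean_line = line
--         if clean_line.startswith('<bos>'):
--             clean_line = clean_line[5:].lstrip()  # Remove <bos> and leading whitespace
--
--         if clean_line.startswith('**'):
--             parts = clean_line.split('\t')
--             for j, part in enumerate(parts):
--                 if part.startswith('**'):
--                     spine_name = part
--                     if spine_name not in spines:
--                         spines[spine_name] = []
--                         spine_indices[spine_name] = j
--
--     # Extract content for each spine
--     for line in lines:
--         # Remove special tokens from line start if present
--         clean_line = line
--         if clean_line.startswith('<bos>'):
--             clean_line = clean_line[5:].lstrip()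
--         if clean_line.startswith('<eos>'):
--             clean_line = clean_line[5:].lstrip()
--
--         # Skip metadata lines (starting with * = !)
--         if clean_line.startswith('*') or clean_line.startswith('=') or clean_line.startswith('!'):
--             # In processed text, metadata lines are usually gone, so skip
--             continue
--
--         # Data line
--         parts = clean_line.split('\t')
--         for spine_name, idx in spine_indices.items():
--             if idx < len(parts):
--                 spines[spine_name].append(parts[idx])
--
--     # Join lines back together
--     result = {}
--     for spine_name, content_list in spines.items():
--         result[spine_name] = '\n'.join(content_list)
--
--     return result
-- ===== SOURCE B (Python) =====
-- def extract_spines(kern_text):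
--     """Column-table re-implementation: the data pass groups every token by its
--     column position into one int-keyed table (no spine names involved); each
--     spine's content is then a single lookup of its column."""
--     lines = kern_text.strip().split('\n')
--
--     # Header scan: first-occurrence spine name -> column position, in order.
--     spine_indices = {}
--     for line in lines:
--         clean = line
--         if clean.startswith('<bos>'):
--             clean = clean[5:].lstrip()
--         if clean.startswith('**'):
--             for j, part in enumerate(clean.split('\t')):
--                 if part.startswith('**'):
--                     spine_indices.setdefault(part, j)
--
--     # Data pass: one table of ALL tokens grouped by column position.
--     cols = {}
--     for line in lines:
--         clean = line
--         if clean.startswith('<bos>'):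
--             clean = clean[5:].lstrip()
--         if clean.startswith('<eos>'):
--             clean = clean[5:].lstrip()
--         if clean.startswith('*') or clean.startswith('=') or clean.startswith('!'):
--             continue
--         for j, tok in enumerate(clean.split('\t')):
--             cols.setdefault(j, []).append(tok)
--
--     # Each spine's content is its column, looked up once.
--     return {name: '\n'.join(cols.get(idx, []))
--             for name, idx in spine_indices.items()}
-- ===== Notes on version B (the rewrite author's own statement) =====
-- stated objective: alternative
-- what changed: The data pass no longer loops over the spines at all: instead of distributing each row's tokens into per-spine-name lists (A's inner loop over spine_indices with an idx<len(parts) probe per spine), B groups every token of every surviving row by its column position into one integer-keyed table via enumerate, and each spine's content becomes a single final lookup of its column in that table.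
import Mathlib
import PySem

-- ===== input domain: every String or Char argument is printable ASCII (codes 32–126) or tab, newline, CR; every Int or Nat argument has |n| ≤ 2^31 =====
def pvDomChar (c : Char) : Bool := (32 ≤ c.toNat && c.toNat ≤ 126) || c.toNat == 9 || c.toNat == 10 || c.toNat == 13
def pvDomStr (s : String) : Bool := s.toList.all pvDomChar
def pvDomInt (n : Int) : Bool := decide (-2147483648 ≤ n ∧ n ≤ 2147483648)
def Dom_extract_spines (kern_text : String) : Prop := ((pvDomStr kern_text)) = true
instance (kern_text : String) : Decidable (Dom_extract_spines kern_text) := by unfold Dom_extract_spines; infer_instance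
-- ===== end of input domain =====

-- B's data pass never touches spine names: it groups every token by its column
-- position into one int-keyed table, and each spine's content is a single final
-- lookup of its column (objective: alternative data structure, same result).

-- shared helper: s.split(sep) for a non-empty literal sep (exact there; sep is "\n" or "\t" below)
def pySplit (s sep : String) : List String := (PySem.Str.split? s sep).getD []

-- shared helpers: both Pythons strip '<bos>'/'<eos>' from a line the same way
def esClean1 (line : String) : String :=
  if PySem.Str.startswith line "<bos>" then PySem.Str.lstrip (PySem.Str.slice line (some 5) none) else line

def esClean2 (line : String) : String :=
  let c1 := if PySem.Str.startswith line "<bos>" then PySem.Str.lstrip (PySem.Str.slice line (some 5) none) else line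
  if PySem.Str.startswith c1 "<eos>" then PySem.Str.lstrip (PySem.Str.slice c1 (some 5) none) else c1

-- ===== PORT A =====
-- one header-pass line: discover spines, recording an empty list and the column index
def esAStep1 (st : PySem.Dict String (List String) × PySem.Dict String Int) (line : String) :
    PySem.Dict String (List String) × PySem.Dict String Int :=
  let clean := esClean1 line
  if PySem.Str.startswith clean "**" then
    (PySem.List.enumerate (pySplit clean "\t")).foldl (fun st jp =>
      if PySem.Str.startswith jp.2 "**" then
        if st.1.contains jp.2 then st
        else (st.1.insert jp.2 [], st.2.insert jp.2 jp.1)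
      else st) st
  else st

-- spines[name].append(parts[idx]) for one (name, idx) pair
def esAApp (parts : List String) (s : PySem.Dict String (List String)) (p : String × Int) :
    PySem.Dict String (List String) :=
  if p.2 < (parts.length : Int) then s.modify p.1 [] (· ++ [PySem.List.pyGetD parts p.2 ""]) else s

-- one content-pass line
def esAStep2 (idxs : PySem.Dict String Int) (s : PySem.Dict String (List String)) (line : String) :
    PySem.Dict String (List String) :=
  let clean := esClean2 line
  if PySem.Str.startswith clean "*" || PySem.Str.startswith clean "=" || PySem.Str.startswith clean "!" then s
  else (idxs.items).foldl (esAApp (pySplit clean "\t")) s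

def extract_spines (kern_text : String) : List (String × String) :=
  let lines := pySplit (PySem.Str.strip kern_text) "\n"
  let p := lines.foldl esAStep1 (PySem.Dict.empty, PySem.Dict.empty)
  let spines2 := lines.foldl (esAStep2 p.2) p.1
  (spines2.items.foldl (fun (r : PySem.Dict String String) q =>
      r.insert q.1 (PySem.Str.join "\n" q.2)) PySem.Dict.empty).items

-- ===== PORT B =====
-- B's header pass: spine_indices.setdefault(part, j) for each header token
def esBStep1 (d : PySem.Dict String Int) (line : String) : PySem.Dict String Int :=
  let clean := esClean1 line
  if PySem.Str.startswith clean "**" then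
    (PySem.List.enumerate (pySplit clean "\t")).foldl (fun d jp =>
      if PySem.Str.startswith jp.2 "**" then d.setdefault jp.2 jp.1 else d) d
  else d

-- B's data pass: every token of a surviving line goes into the column table
-- (cols.setdefault(j, []).append(tok) = modify at key j with default [])
def esBData (c : PySem.Dict Int (List String)) (line : String) : PySem.Dict Int (List String) :=
  let clean := esClean2 line
  if PySem.Str.startswith clean "*" || PySem.Str.startswith clean "=" || PySem.Str.startswith clean "!" then c
  else (PySem.List.enumerate (pySplit clean "\t")).foldl
    (fun c jt => c.modify jt.1 [] (· ++ [jt.2])) c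

def extract_spines_alt (kern_text : String) : List (String × String) :=
  let lines := pySplit (PySem.Str.strip kern_text) "\n"
  let idxs := lines.foldl esBStep1 PySem.Dict.empty
  let cols := lines.foldl esBData PySem.Dict.empty
  ((idxs.items).foldl (fun (r : PySem.Dict String String) p =>
      r.insert p.1 (PySem.Str.join "\n" (cols.getD p.2 []))) PySem.Dict.empty).items

-- ===== PRECONDITION & SPEC =====
def Spec_extract_spines (kern_text : String) (out : List (String × String)) : Prop := out = extract_spines_alt kern_text
instance (kern_text : String) (out : List (String × String)) : Decidable (Spec_extract_spines kern_text out) := by unfold Spec_extract_spines; infer_instance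

-- ===== CLAIM (what is proved, stated in full; the proofs are below) =====
def Claim_equal_extract_spines : Prop := ∀ (kern_text : String), Dom_extract_spines kern_text → Spec_extract_spines kern_text (extract_spines kern_text)

-- ===== LEMMAS AND PROOFS =====

-- generic: a pair of folds over the same list preserves a relation
theorem esFoldlRel {α σ τ : Type} (R : σ → τ → Prop) (f : σ → α → σ) (g : τ → α → τ)
    (h : ∀ s t x, R s t → R (f s x) (g t x)) :
    ∀ (l : List α) (s : σ) (t : τ), R s t → R (l.foldl f s) (l.foldl g t) := by
  intro l
  induction l with
  | nil => intro s t hst; exact hst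
  | cons x xs ih => intro s t hst; exact ih _ _ (h s t x hst)

-- the pass-1 invariant relating A's pair to B's dict
def esInv (st : PySem.Dict String (List String) × PySem.Dict String Int)
    (d : PySem.Dict String Int) : Prop :=
  st.2 = d ∧ st.1.items = d.items.map (fun p => (p.1, ([] : List String))) ∧ d.keys.Nodup

theorem esInv_contains {st : PySem.Dict String (List String) × PySem.Dict String Int}
    {d : PySem.Dict String Int} (h : esInv st d) (k : String) :
    st.1.contains k = d.contains k := by
  rw [PySem.Dict.contains_eq_decide_mem_keys, PySem.Dict.contains_eq_decide_mem_keys]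
  have hk : st.1.keys = d.keys := by
    show st.1.items.map Prod.fst = d.items.map Prod.fst
    rw [h.2.1, List.map_map]; rfl
  rw [hk]

theorem esInv_step1 : ∀ st d line, esInv st d → esInv (esAStep1 st line) (esBStep1 d line) := by
  intro st d line h
  unfold esAStep1 esBStep1
  by_cases hs : PySem.Str.startswith (esClean1 line) "**" = true
  · rw [if_pos hs, if_pos hs]
    apply esFoldlRel esInv _ _ ?step _ st d h
    intro s t jp hst
    obtain ⟨e1, e2, e3⟩ := hst
    have hcont : s.1.contains jp.2 = t.contains jp.2 := esInv_contains ⟨e1, e2, e3⟩ jp.2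
    by_cases h1 : PySem.Str.startswith jp.2 "**" = true
    · rw [if_pos h1, if_pos h1]
      by_cases h2 : t.contains jp.2 = true
      · rw [if_pos (hcont.trans h2), PySem.Dict.setdefault_of_contains _ _ h2]
        exact ⟨e1, e2, e3⟩
      · have h2' : t.contains jp.2 = false := by
          cases hval : t.contains jp.2
          · rfl
          · exact absurd hval h2
        rw [if_neg (by rw [hcont, h2']; exact Bool.false_ne_true),
          PySem.Dict.setdefault_of_not_contains _ _ h2']
        refine ⟨by rw [e1], ?_, PySem.Dict.nodup_keys_insert _ _ _ e3⟩
        rw [PySem.Dict.items_insert_of_not_contains _ _ (by rw [hcont, h2']),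
          PySem.Dict.items_insert_of_not_contains _ _ h2', e2, List.map_append]
        rfl
    · rw [if_neg h1, if_neg h1]
      exact ⟨e1, e2, e3⟩
  · rw [if_neg hs, if_neg hs]
    exact h

-- pass 1 of B only records nonnegative column positions (enumerate starts at 0)
theorem esB1_nonneg_step (d : PySem.Dict String Int) (line : String)
    (h : ∀ p ∈ d.items, 0 ≤ p.2) : ∀ p ∈ (esBStep1 d line).items, 0 ≤ p.2 := by
  unfold esBStep1
  dsimp only
  split
  · have key : ∀ (l : List (Int × String)) (d : PySem.Dict String Int),
        (∀ jp ∈ l, 0 ≤ jp.1) → (∀ p ∈ d.items, 0 ≤ p.2) →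
        ∀ p ∈ (l.foldl (fun d jp =>
          if PySem.Str.startswith jp.2 "**" then d.setdefault jp.2 jp.1 else d) d).items, 0 ≤ p.2 := by
      intro l
      induction l with
      | nil => intro d _ hd; exact hd
      | cons jp rest ih =>
        intro d hl hd
        rw [List.foldl_cons]
        apply ih _ (fun q hq => hl q (List.mem_cons_of_mem _ hq))
        intro p hp
        by_cases h1 : PySem.Str.startswith jp.2 "**" = true
        · rw [if_pos h1] at hp
          by_cases h2 : d.contains jp.2 = true
          · rw [PySem.Dict.setdefault_of_contains _ _ h2] at hp
            exact hd p hp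
          · rw [PySem.Dict.setdefault_of_not_contains _ _ (by
              cases hv : d.contains jp.2; rfl; exact absurd hv h2)] at hp
            rcases (PySem.Dict.mem_items_insert ..).1 hp with rfl | ⟨hm, _⟩
            · exact hl jp (List.mem_cons_self ..)
            · exact hd p hm
        · rw [if_neg h1] at hp
          exact hd p hp
    apply key _ _ _ h
    intro jp hjp
    obtain ⟨k, _, rfl⟩ := (PySem.List.mem_enumerate_iff ..).1 hjp
    simp
  · exact h

theorem esB1_nonneg (lines : List String) :
    ∀ (d : PySem.Dict String Int), (∀ p ∈ d.items, 0 ≤ p.2) →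
      ∀ p ∈ (lines.foldl esBStep1 d).items, 0 ≤ p.2 := by
  induction lines with
  | nil => intro d hd; exact hd
  | cons l rest ih => intro d hd; exact ih _ (esB1_nonneg_step d l hd)

-- pass-2 pointwise lemmas on A's side
theorem esApp_getD_untouched (parts : List String) :
    ∀ (its : List (String × Int)) (d : PySem.Dict String (List String)) (k : String),
      k ∉ its.map Prod.fst →
      (its.foldl (esAApp parts) d).getD k [] = d.getD k [] := by
  intro its
  induction its with
  | nil => intro d k _; rfl
  | cons q rest ih =>
    intro d k hk
    simp only [List.map_cons, List.mem_cons, not_or] at hk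
    rw [List.foldl_cons, ih _ _ hk.2]
    unfold esAApp
    split
    · exact PySem.Dict.getD_modify_of_ne _ _ _ hk.1
    · rfl

theorem esApp_getD (parts : List String) :
    ∀ (its : List (String × Int)) (d : PySem.Dict String (List String)),
      (its.map Prod.fst).Nodup →
      ∀ p ∈ its, (its.foldl (esAApp parts) d).getD p.1 [] =
        d.getD p.1 [] ++ (if p.2 < (parts.length : Int) then [PySem.List.pyGetD parts p.2 ""] else []) := by
  intro its
  induction its with
  | nil => intro d _ p hp; cases hp
  | cons q rest ih =>
    intro d hnd p hp
    simp only [List.map_cons, List.nodup_cons] at hnd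
    rw [List.mem_cons] at hp
    rcases hp with rfl | hp
    · rw [List.foldl_cons, esApp_getD_untouched parts rest _ _ hnd.1]
      unfold esAApp
      split
      · rw [PySem.Dict.getD_modify_self]
      · simp
    · rw [List.foldl_cons, ih _ hnd.2 p hp]
      have hne : p.1 ≠ q.1 := by
        intro hEq
        exact hnd.1 (hEq ▸ List.mem_map_of_mem hp)
      unfold esAApp
      split
      · rw [PySem.Dict.getD_modify_of_ne _ _ _ hne]
      · rfl

theorem esApp_keys (parts : List String) :
    ∀ (its : List (String × Int)) (d : PySem.Dict String (List String)),
      (∀ p ∈ its, d.contains p.1 = true) →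
      (its.foldl (esAApp parts) d).keys = d.keys := by
  intro its
  induction its with
  | nil => intro d _; rfl
  | cons q rest ih =>
    intro d hc
    rw [List.foldl_cons, ih]
    · unfold esAApp
      split
      · rw [PySem.Dict.keys_modify, PySem.Dict.keys_insert_of_contains]
        exact hc q (List.mem_cons_self ..)
      · rfl
    · intro p hp
      unfold esAApp
      split
      · rw [PySem.Dict.contains_modify]
        simp [hc p (List.mem_cons_of_mem _ hp)]
      · exact hc p (List.mem_cons_of_mem _ hp)

-- B's column table: the tokens filed under a nonnegative column j of one row
theorem esEnumFilter (parts : List String) (j : Int) (hj : 0 ≤ j) :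
    ((PySem.List.enumerate parts).filter (fun q => q.1 == j)).map Prod.snd
      = if j < (parts.length : Int) then [PySem.List.pyGetD parts j ""] else [] := by
  rw [PySem.List.enumerate_eq_map_pyRange parts "", List.filter_map, List.map_map]
  have hcomp : ((fun (q : Int × String) => q.1 == j) ∘ (fun i => (i, PySem.List.pyGetD parts i "")))
      = (fun i => i == j) := rfl
  rw [hcomp, List.filter_beq]
  by_cases hlt : j < (parts.length : Int)
  · rw [List.count_eq_one_of_mem (PySem.List.nodup_pyRange_one 0 (PySem.List.len parts))
      ((PySem.List.mem_pyRange_one ..).2 ⟨hj, by simpa using hlt⟩), if_pos hlt]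
    simp
  · rw [List.count_eq_zero_of_not_mem
      (fun hm => hlt (by simpa using ((PySem.List.mem_pyRange_one ..).1 hm).2)), if_neg hlt]
    rfl

-- the data-pass invariant: A's per-name lists agree with B's per-column lists
def esInv2 (its : List (String × Int)) (s : PySem.Dict String (List String))
    (c : PySem.Dict Int (List String)) : Prop :=
  s.keys = its.map Prod.fst ∧ ∀ p ∈ its, s.getD p.1 [] = c.getD p.2 []

theorem esInv2_step (idxs : PySem.Dict String Int)
    (hnd : (idxs.items.map Prod.fst).Nodup) (hnn : ∀ p ∈ idxs.items, 0 ≤ p.2) :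
    ∀ s c line, esInv2 idxs.items s c → esInv2 idxs.items (esAStep2 idxs s line) (esBData c line) := by
  intro s c line h
  unfold esAStep2 esBData
  by_cases hm : (PySem.Str.startswith (esClean2 line) "*"
      || PySem.Str.startswith (esClean2 line) "=" || PySem.Str.startswith (esClean2 line) "!") = true
  · rw [if_pos hm, if_pos hm]; exact h
  · rw [if_neg hm, if_neg hm]
    obtain ⟨hk, hpt⟩ := h
    have hcont : ∀ p ∈ idxs.items, s.contains p.1 = true := by
      intro p hp
      rw [PySem.Dict.contains_eq_decide_mem_keys, hk]
      simpa using List.mem_map_of_mem (f := Prod.fst) hp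
    refine ⟨by rw [esApp_keys _ _ _ hcont, hk], ?_⟩
    intro p hp
    rw [esApp_getD _ _ _ hnd p hp, hpt p hp,
      PySem.Dict.getD_foldl_modify_append, esEnumFilter _ _ (hnn p hp)]

theorem extract_spines_eq (kern_text : String) :
    extract_spines kern_text = extract_spines_alt kern_text := by
  unfold extract_spines extract_spines_alt
  dsimp only
  set lines := pySplit (PySem.Str.strip kern_text) "\n" with hl
  set pA := lines.foldl esAStep1 (PySem.Dict.empty, PySem.Dict.empty) with hpA
  set idxs := lines.foldl esBStep1 PySem.Dict.empty with hidxs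
  clear_value pA idxs
  have hinv : esInv pA idxs := by
    rw [hpA, hidxs]
    exact esFoldlRel esInv esAStep1 esBStep1 esInv_step1 lines _ _ ⟨rfl, rfl, List.nodup_nil⟩
  obtain ⟨hsnd, hitems, hnodup⟩ := hinv
  have hndfst : (idxs.items.map Prod.fst).Nodup := hnodup
  have hnn : ∀ p ∈ idxs.items, 0 ≤ p.2 := by
    rw [hidxs]
    exact esB1_nonneg lines PySem.Dict.empty (by intro p hp; cases hp)
  set cols := lines.foldl esBData PySem.Dict.empty with hcols
  clear_value cols
  -- run the two data passes in lockstep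
  have hinv2 : esInv2 idxs.items (lines.foldl (esAStep2 pA.2) pA.1) cols := by
    rw [hsnd, hcols]
    apply esFoldlRel (esInv2 idxs.items) (esAStep2 idxs) esBData
      (fun s c line => esInv2_step idxs hndfst hnn s c line) lines
    constructor
    · show pA.1.items.map Prod.fst = _
      rw [hitems, List.map_map]; rfl
    · intro p hp
      have hmem : (p.1, ([] : List String)) ∈ pA.1.items := by
        rw [hitems]
        exact List.mem_map_of_mem (f := fun p => (p.1, ([] : List String))) hp
      have hnd1 : pA.1.keys.Nodup := by
        show (pA.1.items.map Prod.fst).Nodup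
        rw [hitems, List.map_map]; exact hndfst
      rw [PySem.Dict.getD_empty, PySem.Dict.getD_of_mem_items pA.1 hmem hnd1]
  obtain ⟨hk2, hpt2⟩ := hinv2
  set spines2 := lines.foldl (esAStep2 pA.2) pA.1 with hs2
  clear_value spines2
  have hnd2 : spines2.keys.Nodup := by rw [hk2]; exact hndfst
  -- both result folds insert fresh distinct keys into an empty dict
  rw [PySem.Dict.items_foldl_insert_fresh spines2.items Prod.fst
      (fun q => PySem.Str.join "\n" q.2) PySem.Dict.empty (by intro a _; rfl) (by exact hnd2)]
  rw [PySem.Dict.items_foldl_insert_fresh idxs.items Prod.fst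
      (fun p => PySem.Str.join "\n" (cols.getD p.2 [])) PySem.Dict.empty
      (by intro a _; rfl) hndfst]
  rw [PySem.Dict.items_eq_map_keys spines2 hnd2 [], hk2]
  simp only [List.map_map]
  apply List.map_congr_left
  intro p hp
  simp only [Function.comp_apply]
  rw [hpt2 p hp]

-- ===== VERDICT (by name: the statement is the Claim_ definition above) =====
theorem extract_spines_spec : Claim_equal_extract_spines := by
  intro kern_text _
  unfold Spec_extract_spines
  exact extract_spines_eq kern_text
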